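-- pv_equiv track=rewrite | github.com/kimsinhyun/CodingTest | 종우/기능개발.py | solution
-- ===== SOURCE A (Python) =====
-- import math
--
-- def solution(progresses, speeds):
--     answer = []
--     dday = []
--     for p, s in zip(progresses, speeds):
--         pday = math.ceil((100-p)/s)
--         dday.append(pday)
--
--     nf = 1
--     lt = dday.pop(0)
--     for i in dday:
--         if i <= lt:
--             nf += 1
--         else:
--             answer.append(nf)
--             nf = 1
--             lt = i
--     answer.append(nf)
--     return answer
-- ===== SOURCE B (Python) =====
-- import math
--
--
-- def solution(progresses, speeds):
--     dday = [math.ceil((100 - p) / s) for p, s in zip(progresses, speeds)]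
--
--     def groups(days):
--         if not days:
--             return []
--         leader = days[0]
--         k = 1
--         while k < len(days) and days[k] <= leader:
--             k += 1
--         return [k] + groups(days[k:])
--
--     return groups(dday)
-- ===== Notes on version B (the rewrite author's own statement) =====
-- stated objective: alternative
-- what changed: Replaces A's single-pass leader/counter state machine by a recursive divide: each group is found as the maximal prefix of the remaining days not exceeding its first element (inner scan), then recursion on the suffix.
import Mathlib
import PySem

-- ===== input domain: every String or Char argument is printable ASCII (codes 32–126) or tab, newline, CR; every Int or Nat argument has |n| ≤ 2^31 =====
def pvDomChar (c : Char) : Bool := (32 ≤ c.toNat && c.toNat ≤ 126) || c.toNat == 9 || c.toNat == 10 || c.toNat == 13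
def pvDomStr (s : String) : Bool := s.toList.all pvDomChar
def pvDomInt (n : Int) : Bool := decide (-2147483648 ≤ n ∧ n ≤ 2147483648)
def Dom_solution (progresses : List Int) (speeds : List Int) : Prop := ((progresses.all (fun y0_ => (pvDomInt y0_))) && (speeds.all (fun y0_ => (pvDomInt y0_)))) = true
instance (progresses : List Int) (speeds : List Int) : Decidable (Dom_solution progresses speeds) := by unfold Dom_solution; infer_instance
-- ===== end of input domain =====

-- B replaces A's leader/counter state machine by a recursive split into maximal groups; equal return values on Pre_.

-- ===== PORT A =====
-- math.ceil((100-p)/s) on ints of this domain equals exact ceiling division -((-(100-p)) // s):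
-- |100-p| ≤ 2^31+100 < 2^53, so the float quotient is correctly rounded, and when the exact
-- quotient is not an integer its distance to the nearest integer (≥ 1/|s|) exceeds half an ulp.
def pvCeilDay (p : Int) (s : Int) : Int := -(PySem.Int.floordiv (-(100 - p)) s)

-- the second for-loop of A, carrying (answer, nf, lt); the final answer.append(nf) is the [] case
def pvALoop (answer : List Int) (nf : Int) (lt : Int) : List Int → List Int
  | [] => answer ++ [nf]
  | i :: rest =>
      if i ≤ lt then pvALoop answer (nf + 1) lt rest
      else pvALoop (answer ++ [nf]) 1 i rest

def solution (progresses : List Int) (speeds : List Int) : List Int :=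
  let dday := (progresses.zip speeds).map (fun ps => pvCeilDay ps.1 ps.2)
  match dday with
  | [] => []          -- unreachable under Pre_: dday.pop(0) raises IndexError in Python
  | lt :: rest => pvALoop [] 1 lt rest

-- ===== PORT B =====
-- B's inner while loop: how many leading days of the tail do not exceed the leader
def pvTakeLE (leader : Int) : List Int → Nat
  | [] => 0
  | d :: ds => if d ≤ leader then pvTakeLE leader ds + 1 else 0

-- B's recursive groups: emit the size of the first group, recurse on the suffix
def pvGroups : List Int → List Int
  | [] => []
  | d :: ds =>
      let t := pvTakeLE d ds
      ((1 + t : Nat) : Int) :: pvGroups (ds.drop t)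
  termination_by l => l.length
  decreasing_by simp [List.length_drop]

def solution_alt (progresses : List Int) (speeds : List Int) : List Int :=
  let dday := (progresses.zip speeds).map (fun ps => pvCeilDay ps.1 ps.2)
  pvGroups dday

-- ===== PRECONDITION & SPEC =====
-- Pre_ excludes exactly where Python A raises: empty input (pop(0) → IndexError) and a zero
-- speed inside the zipped prefix (ZeroDivisionError).
def Pre_solution (progresses : List Int) (speeds : List Int) : Prop :=
  progresses ≠ [] ∧ speeds ≠ [] ∧ ∀ s ∈ speeds.take progresses.length, s ≠ 0
instance (progresses : List Int) (speeds : List Int) : Decidable (Pre_solution progresses speeds) := by unfold Pre_solution; infer_instance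
def pvWitness_solution : List Int × List Int := ([53, 30, 95], [2, 1, 4])

def Spec_solution (progresses : List Int) (speeds : List Int) (out : List Int) : Prop := out = solution_alt progresses speeds
instance (progresses : List Int) (speeds : List Int) (out : List Int) : Decidable (Spec_solution progresses speeds out) := by unfold Spec_solution; infer_instance

-- ===== CLAIM (what is proved, stated in full; the proofs are below) =====
def Claim_equal_solution : Prop := ∀ (progresses : List Int) (speeds : List Int), Dom_solution progresses speeds → Pre_solution progresses speeds → Spec_solution progresses speeds (solution progresses speeds)

-- ===== LEMMAS AND PROOFS =====

@[simp] theorem pvGroups_nil : pvGroups [] = [] := by rw [pvGroups]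

theorem pvGroups_cons (d : Int) (ds : List Int) :
    pvGroups (d :: ds) = ((1 + pvTakeLE d ds : Nat) : Int) :: pvGroups (ds.drop (pvTakeLE d ds)) := by
  rw [pvGroups]

-- A's loop counts exactly the maximal ≤-leader prefix, then restarts at the first larger day,
-- which is B's recursion step.
theorem pvALoop_eq_groups (rest : List Int) : ∀ (answer : List Int) (nf lt : Int),
    pvALoop answer nf lt rest
      = answer ++ ((nf + (pvTakeLE lt rest : Int)) :: pvGroups (rest.drop (pvTakeLE lt rest))) := by
  induction rest with
  | nil => intro answer nf lt; simp [pvALoop, pvTakeLE]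
  | cons i rs ih =>
      intro answer nf lt
      by_cases h : i ≤ lt
      · simp only [pvALoop, if_pos h, ih, pvTakeLE]
        rw [List.drop_succ_cons]
        congr 2
        push_cast
        ring
      · simp only [pvALoop, if_neg h, ih, pvTakeLE]
        rw [List.drop_zero, pvGroups_cons]
        push_cast
        simp [List.append_assoc]

-- ===== VERDICT (by name: the statement is the Claim_ definition above) =====
theorem solution_spec : Claim_equal_solution := by
  intro progresses speeds _ hpre
  unfold Spec_solution solution solution_alt
  obtain ⟨hp, hs, -⟩ := hpre
  cases progresses with
  | nil => exact absurd rfl hp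
  | cons p ps =>
    cases speeds with
    | nil => exact absurd rfl hs
    | cons s ss =>
      simp only [List.zip_cons_cons, List.map_cons]
      rw [pvALoop_eq_groups, pvGroups_cons]
      simp only [List.nil_append]
      congr 1
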